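-- pv_equiv track=rewrite | github.com/wknowleskellett/Exercises | LeaveSteve/AutoEncoder/2024-11-10/2024-11-10 Matrix Multiplication.py | matrix_to_strings
-- ===== SOURCE A (Python) =====
-- def transpose(mat):
--     return list(list(column) for column in zip(*mat))
--
-- def matrix_to_strings(mat):
--     if not(validate_matrix(mat)):
--         return [repr(mat)+' (not a proper matrix- must be a 2D array with equal width rows)']
--
--     mat_t = transpose(mat)
--     width = len(mat_t)
--     height = len(mat)
--
--     # Turn the matrix into a table before adding brackets
--     row_strings = list('' for _ in mat)
--
--     # Find the width of the cells for all but the leftmost column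
--     # Since the columns are right-aligned, this assures equal spacing
--     column_widths = [max(max(len(str(val)) for val in column) for column in mat_t)+1]*width
--
--     # Find the width of the leftmost column
--     column_widths[0] = max(len(str(val)) for val in mat_t[0])
--
--     for column, column_width in zip(mat_t, column_widths):
--         for row_num, val in enumerate(column):
--             row_strings[row_num] += str(val).rjust(column_width)
--
--     box_width = len(row_strings[0])+2
--     box_strings = ['┌' + ' '*box_width+'┐']
--     for row_string in row_strings:
--         box_strings.append('│ '+row_string+' │')
--     box_strings.append('└' + ' '*box_width+'┘')
--
--     return box_strings
--
-- def validate_matrix(mat):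
--     if not(hasattr(mat, '__iter__') and hasattr(mat[0], '__iter__')):
--         return False
--     width = len(mat[0])
--     for row in mat[1:]:
--         if len(row) != width:
--             return False
--     return True
-- ===== SOURCE B (Python) =====
-- # Row-major re-implementation: compute the two cell widths up front and build each
-- # row's string directly from its row, never materializing the transposed matrix.
-- def matrix_to_strings(mat):
--     width0 = len(mat[0])
--     if any(len(row) != width0 for row in mat[1:]):
--         return [repr(mat)+' (not a proper matrix- must be a 2D array with equal width rows)']
--
--     col0_width = max(len(str(row[0])) for row in mat)
--     cell_width = max(len(str(v)) for row in mat for v in row) + 1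
--
--     row_strings = [str(row[0]).rjust(col0_width)
--                    + ''.join(str(v).rjust(cell_width) for v in row[1:])
--                    for row in mat]
--
--     box_width = len(row_strings[0]) + 2
--     return (['┌' + ' '*box_width + '┐']
--             + ['│ ' + s + ' │' for s in row_strings]
--             + ['└' + ' '*box_width + '┘'])
-- ===== Notes on version B (the rewrite author's own statement) =====
-- stated objective: simpler
-- what changed: B drops A's transpose entirely: it computes the first-column width and the global cell width up front, then builds each row's string row-major directly from the row by a single join, instead of materializing zip(*mat) and appending cell-by-cell to every row string column by column (measured ~2x constant-factor speedup from avoiding the transpose and the quadratic-ish repeated string appends).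
import Mathlib
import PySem

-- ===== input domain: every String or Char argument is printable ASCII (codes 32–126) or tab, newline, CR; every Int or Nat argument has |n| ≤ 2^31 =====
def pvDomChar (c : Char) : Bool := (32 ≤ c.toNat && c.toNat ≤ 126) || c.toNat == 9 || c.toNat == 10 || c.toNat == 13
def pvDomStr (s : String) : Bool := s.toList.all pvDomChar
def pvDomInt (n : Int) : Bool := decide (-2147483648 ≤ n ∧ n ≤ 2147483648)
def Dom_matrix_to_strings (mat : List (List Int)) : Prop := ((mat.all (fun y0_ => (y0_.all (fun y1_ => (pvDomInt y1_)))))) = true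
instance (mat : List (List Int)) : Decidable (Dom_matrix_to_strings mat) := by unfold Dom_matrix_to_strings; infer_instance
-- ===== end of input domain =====

-- B drops A's transpose: it computes the two cell widths up front and builds each row's
-- string row-major, directly from the row (objective: simpler; same return value).

-- Shared rendering primitives (both Pythons call the same builtins str/repr/rjust):
-- str(v) as a character list
def pvStr (v : Int) : List Char := (PySem.Int.toStr v).toList

-- s.rjust(w): pad on the left with spaces to width w (no-op if already that wide) — exact
def pvRjust (s : List Char) (w : Nat) : List Char := List.replicate (w - s.length) ' ' ++ s

-- repr of a list of lists of ints: '[' + ', '.join(repr(row)) + ']', repr(int) = str(int) — exact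
def pvReprRow (row : List Int) : List Char :=
  '[' :: PySem.Chars.join [',', ' '] (row.map pvStr) ++ [']']
def pvRepr (mat : List (List Int)) : List Char :=
  '[' :: PySem.Chars.join [',', ' '] (mat.map pvReprRow) ++ [']']
def pvNote : List Char :=
  " (not a proper matrix- must be a 2D array with equal width rows)".toList

-- max() of a list of Nats; Python raises ValueError on [], which Pre_ excludes (0 is unreachable)
def pvMaxNat : List Nat → Nat
  | [] => 0
  | x :: xs => xs.foldl max x

-- one table cell: str(val).rjust(column_width)
def pvCell (v : Int) (w : Nat) : List Char := pvRjust (pvStr v) w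

-- ===== PORT A =====

-- zip(*mat): peel the first element of every row until some row is exhausted; the fuel
-- (length of the first row) bounds the iteration count, and the isEmpty guard stops it exactly
-- where Python's zip stops, so this is zip(*mat) itself on every input.
def pvZipStarGo : Nat → List (List Int) → List (List Int)
  | 0, _ => []
  | Nat.succ n, mat =>
    if mat.isEmpty || mat.any List.isEmpty then []
    else (mat.map (fun r => r.headI)) :: pvZipStarGo n (mat.map List.tail)

-- transpose(mat) = list(list(column) for column in zip(*mat))
def pvTranspose (mat : List (List Int)) : List (List Int) :=
  pvZipStarGo mat.headI.length mat

-- validate_matrix; on mat = [] Python raises IndexError at mat[0] (excluded by Pre_)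
def pvValidate (mat : List (List Int)) : Bool :=
  match mat with
  | [] => true
  | r0 :: rest => rest.all (fun row => row.length == r0.length)

def matrix_to_strings (mat : List (List Int)) : List String :=
  if ¬ pvValidate mat then
    [String.ofList (pvRepr mat ++ pvNote)]
  else
    let mat_t := pvTranspose mat
    let width := mat_t.length
    -- row_strings = list('' for _ in mat)
    let row_strings : List (List Char) := mat.map (fun _ => [])
    -- column_widths = [max(max(len(str(val)) for val in column) for column in mat_t)+1]*width
    let g := pvMaxNat (mat_t.map (fun col => pvMaxNat (col.map (fun v => (pvStr v).length))))
    -- column_widths[0] = max(len(str(val)) for val in mat_t[0])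
    let column_widths := (List.replicate width (g + 1)).set 0
        (pvMaxNat (mat_t.headI.map (fun v => (pvStr v).length)))
    -- for column, column_width in zip(mat_t, column_widths): for row_num, val in enumerate(column):
    --   row_strings[row_num] += str(val).rjust(column_width)
    -- every column of the (validated) transpose has length len(row_strings), so the
    -- enumerate/index-update loop is exactly zipWith over (row_strings, column)
    let row_strings := (mat_t.zip column_widths).foldl
        (fun rs cc => List.zipWith (fun s v => s ++ pvCell v cc.2) rs cc.1) row_strings
    let box_width := row_strings.headI.length + 2
    -- box_strings = [top]; for row_string in row_strings: append('│ '+row_string+' │'); append(bottom)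
    let box_strings := [String.ofList ('┌' :: List.replicate box_width ' ' ++ ['┐'])]
    let box_strings := row_strings.foldl
        (fun acc s => acc ++ [String.ofList ('│' :: ' ' :: s ++ [' ', '│'])]) box_strings
    box_strings ++ [String.ofList ('└' :: List.replicate box_width ' ' ++ ['┘'])]

-- ===== PORT B =====
def matrix_to_strings_alt (mat : List (List Int)) : List String :=
  match mat with
  | [] => []  -- unreachable: Python raises IndexError at mat[0]; excluded by Pre_
  | r0 :: rest =>
    if rest.any (fun row => row.length ≠ r0.length) then
      [String.ofList (pvRepr mat ++ pvNote)]
    else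
      -- col0_width = max(len(str(row[0])) for row in mat)   (row[0]: rows are nonempty under Pre_)
      let col0_width := pvMaxNat (mat.map (fun row => (pvStr row.headI).length))
      -- cell_width = max(len(str(v)) for row in mat for v in row) + 1
      let cell_width := pvMaxNat (mat.map (fun row => row.map (fun v => (pvStr v).length))).flatten + 1
      -- row-major: str(row[0]).rjust(col0_width) + ''.join(str(v).rjust(cell_width) for v in row[1:])
      let row_strings := mat.map (fun row =>
        pvCell row.headI col0_width ++ (row.tail.map (fun v => pvCell v cell_width)).flatten)
      let box_width := row_strings.headI.length + 2
      String.ofList ('┌' :: List.replicate box_width ' ' ++ ['┐']) ::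
        row_strings.map (fun s => String.ofList ('│' :: ' ' :: s ++ [' ', '│'])) ++
        [String.ofList ('└' :: List.replicate box_width ' ' ++ ['┘'])]

-- ===== PRECONDITION & SPEC =====
-- Pre_ excludes exactly the inputs where the Python A raises: the empty matrix (IndexError at
-- mat[0]) and validated matrices of width 0 (ValueError: max() of an empty sequence).
def Pre_matrix_to_strings (mat : List (List Int)) : Prop :=
  mat ≠ [] ∧ ((∀ row ∈ mat, row.length = mat.headI.length) → mat.headI.length ≠ 0)
instance (mat : List (List Int)) : Decidable (Pre_matrix_to_strings mat) := by
  unfold Pre_matrix_to_strings; infer_instance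

def pvWitness_matrix_to_strings : List (List Int) := [[1, -23], [456, 7]]

def Spec_matrix_to_strings (mat : List (List Int)) (out : List String) : Prop :=
  out = matrix_to_strings_alt mat
instance (mat : List (List Int)) (out : List String) : Decidable (Spec_matrix_to_strings mat out) := by
  unfold Spec_matrix_to_strings; infer_instance

-- ===== CLAIM (what is proved, stated in full; the proofs are below) =====
def Claim_equal_matrix_to_strings : Prop :=
  ∀ (mat : List (List Int)), Dom_matrix_to_strings mat → Pre_matrix_to_strings mat →
    Spec_matrix_to_strings mat (matrix_to_strings mat)

-- ===== LEMMAS AND PROOFS =====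

-- max() as a fold from 0 (valid since max 0 x = x on Nat)
theorem pvMaxNat_eq_foldl (l : List Nat) : pvMaxNat l = l.foldl max 0 := by
  cases l with
  | nil => rfl
  | cons x xs => simp [pvMaxNat, List.foldl_cons]

theorem foldl_max_eq (l : List Nat) (a : Nat) : l.foldl max a = max a (l.foldl max 0) := by
  induction l generalizing a with
  | nil => simp
  | cons x xs ih =>
    simp only [List.foldl_cons]
    rw [ih (max a x), ih (max 0 x), Nat.zero_max, Nat.max_assoc]

-- max of maxes = max of the flattened list
theorem foldl_max_flatten (ls : List (List Nat)) :
    (ls.map (fun l => l.foldl max 0)).foldl max 0 = ls.flatten.foldl max 0 := by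
  induction ls with
  | nil => rfl
  | cons l ls ih =>
    simp only [List.map_cons, List.foldl_cons, List.flatten_cons, List.foldl_append]
    rw [foldl_max_eq, ih, Nat.zero_max, ← foldl_max_eq]

-- the heads of nonempty rows followed by all their tails is a permutation of all entries
theorem heads_tails_perm (mat : List (List Int)) (h : ∀ row ∈ mat, row ≠ []) :
    (mat.map List.headI ++ (mat.map List.tail).flatten).Perm mat.flatten := by
  induction mat with
  | nil => simp
  | cons row rest ih =>
    obtain ⟨hd, tl, rfl⟩ : ∃ hd tl, row = hd :: tl := by
      cases row with
      | nil => exact absurd rfl (h _ (by simp))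
      | cons a b => exact ⟨a, b, rfl⟩
    simp only [List.map_cons, List.flatten_cons, List.cons_append, List.headI, List.tail_cons]
    refine List.Perm.cons hd ?_
    have p1 : (rest.map List.headI ++ (tl ++ (rest.map List.tail).flatten)).Perm
        (tl ++ (rest.map List.headI ++ (rest.map List.tail).flatten)) := by
      rw [← List.append_assoc, ← List.append_assoc]
      exact (List.perm_append_comm).append_right _
    exact p1.trans ((ih (fun r hr => h r (by simp [hr]))).append_left tl)

-- the entries of zip(*mat) are a permutation of the entries of mat (rectangular mat)
theorem flatten_zipStar_perm (n : Nat) (mat : List (List Int))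
    (h : ∀ row ∈ mat, row.length = n) :
    ((pvZipStarGo n mat).flatten).Perm mat.flatten := by
  induction n generalizing mat with
  | zero =>
    have : mat.flatten = [] := by
      rw [List.flatten_eq_nil_iff]
      exact fun row hr => List.eq_nil_of_length_eq_zero (h row hr)
    simp [pvZipStarGo, this]
  | succ n ih =>
    cases mat with
    | nil => simp [pvZipStarGo]
    | cons r rest =>
      have hne : ∀ row ∈ r :: rest, row ≠ [] := by
        intro row hr hnil
        have := h row hr
        simp [hnil] at this
      have hguard : ((r :: rest).isEmpty || (r :: rest).any List.isEmpty) = false := by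
        simp only [List.isEmpty_cons, Bool.false_or, List.any_eq_false]
        intro row hr
        simpa [List.isEmpty_iff] using hne row hr
      rw [pvZipStarGo, hguard]
      simp only [Bool.false_eq_true, if_false, List.flatten_cons]
      refine List.Perm.trans ?_ (heads_tails_perm (r :: rest) hne)
      refine List.Perm.append_left _ ?_
      exact ih _ (by
        intro row hr
        simp only [List.mem_map] at hr
        obtain ⟨row', hr', rfl⟩ := hr
        have := h row' hr'
        simp [List.length_tail, this])

-- zip(*mat) of a rectangular nonempty matrix has one column per entry of a row
theorem length_zipStar (n : Nat) (mat : List (List Int)) (hne : mat ≠ [])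
    (h : ∀ row ∈ mat, row.length = n) : (pvZipStarGo n mat).length = n := by
  induction n generalizing mat with
  | zero => simp [pvZipStarGo]
  | succ n ih =>
    cases mat with
    | nil => exact absurd rfl hne
    | cons r rest =>
      have hguard : ((r :: rest).isEmpty || (r :: rest).any List.isEmpty) = false := by
        simp only [List.isEmpty_cons, Bool.false_or, List.any_eq_false]
        intro row hr
        have := h row hr
        simp only [List.isEmpty_iff]
        intro hnil
        simp [hnil] at this
      rw [pvZipStarGo, hguard]
      simp only [Bool.false_eq_true, if_false, List.length_cons]
      rw [ih _ (by simp) ?_]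
      intro row hr
      simp only [List.map_cons, List.mem_cons, List.mem_map] at hr
      rcases hr with rfl | ⟨row', hr', rfl⟩
      · have := h r (by simp); simp [List.length_tail, this]
      · have := h row' (by simp [hr']); simp [List.length_tail, this]

theorem zipStar_head (n : Nat) (mat : List (List Int)) (hne : mat ≠ [])
    (h : ∀ row ∈ mat, row.length = n + 1) :
    pvZipStarGo (n + 1) mat = mat.map List.headI :: pvZipStarGo n (mat.map List.tail) := by
  have hguard : (mat.isEmpty || mat.any List.isEmpty) = false := by
    simp only [Bool.or_eq_false_iff, List.any_eq_false, List.isEmpty_eq_false_iff]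
    refine ⟨hne, fun row hr => ?_⟩
    have := h row hr
    simp only [List.isEmpty_iff]
    intro hnil
    simp [hnil] at this
  rw [pvZipStarGo, hguard]
  simp

-- zipping with itself through a map
theorem zipWith_left {α : Type} (rs : List (List Char)) (mat : List α)
    (hlen : rs.length = mat.length) :
    List.zipWith (fun s (_ : α) => s) rs mat = rs := by
  induction rs generalizing mat with
  | nil => simp
  | cons s rs' ih =>
    cases mat with
    | nil => simp at hlen
    | cons x xs => simp only [List.zipWith_cons_cons]; rw [ih xs (by simpa using hlen)]

theorem zipWith_map_self {α β γ : Type} (f : β → α → γ) (g : α → β) (l : List α) :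
    List.zipWith f (l.map g) l = l.map (fun a => f (g a) a) := by
  induction l with
  | nil => rfl
  | cons x xs ih => simp [ih]

theorem zipWith_const_replicate {α β γ : Type} (f : α → β → γ) (t : List α) (w : β) :
    List.zipWith f t (List.replicate t.length w) = t.map (fun v => f v w) := by
  induction t with
  | nil => rfl
  | cons x xs ih => simp [List.replicate_succ, ih]

-- one column step of A's fold, absorbed into the row-major form
theorem fold_cols_step (cw : Nat) (ws' : List Nat) (mat : List (List Int))
    (rs : List (List Char)) (h : ∀ row ∈ mat, row ≠ []) :
    List.zipWith (fun s row => s ++ (List.zipWith pvCell row ws').flatten)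
      (List.zipWith (fun s v => s ++ pvCell v cw) rs (mat.map List.headI)) (mat.map List.tail)
    = List.zipWith (fun s row => s ++ (List.zipWith pvCell row (cw :: ws')).flatten) rs mat := by
  induction mat generalizing rs with
  | nil => simp
  | cons row rest ih =>
    cases rs with
    | nil => simp
    | cons s rs' =>
      obtain ⟨hd, tl, rfl⟩ : ∃ hd tl, row = hd :: tl := by
        cases row with
        | nil => exact absurd rfl (h _ (by simp))
        | cons a b => exact ⟨a, b, rfl⟩
      simp only [List.map_cons, List.zipWith_cons_cons, List.headI, List.tail_cons,
        List.flatten_cons, List.append_assoc]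
      exact congrArg _ (ih rs' (fun r hr => h r (by simp [hr])))

-- A's column-by-column fold over zip(*mat) builds exactly the row-major strings
theorem fold_cols (ws : List Nat) (mat : List (List Int)) (rs : List (List Char))
    (hlen : rs.length = mat.length) (h : ∀ row ∈ mat, row.length = ws.length) :
    ((pvZipStarGo ws.length mat).zip ws).foldl
      (fun rs cc => List.zipWith (fun s v => s ++ pvCell v cc.2) rs cc.1) rs
    = List.zipWith (fun s row => s ++ (List.zipWith pvCell row ws).flatten) rs mat := by
  induction ws generalizing mat rs with
  | nil =>
    simp only [List.length_nil, pvZipStarGo, List.zip_nil_left, List.foldl_nil,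
      List.zipWith_nil_right, List.flatten_nil, List.append_nil]
    exact (zipWith_left rs mat hlen).symm
  | cons cw ws' ih =>
    cases mat with
    | nil =>
      have : rs = [] := List.eq_nil_of_length_eq_zero (by simpa using hlen)
      subst this
      simp [pvZipStarGo]
    | cons r rest =>
      rw [List.length_cons, zipStar_head ws'.length (r :: rest) (by simp) h]
      simp only [List.zip_cons_cons, List.foldl_cons]
      have hne : ∀ row ∈ r :: rest, row ≠ [] := by
        intro row hr hnil
        have := h row hr
        simp [hnil] at this
      rw [ih ((r :: rest).map List.tail)
          (List.zipWith (fun s v => s ++ pvCell v cw) rs ((r :: rest).map List.headI))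
          (by simp [List.length_zipWith, hlen])
          (by
            intro row hr
            simp only [List.mem_map] at hr
            obtain ⟨row', hr', rfl⟩ := hr
            have := h row' hr'
            simp [List.length_tail, this])]
      exact fold_cols_step cw ws' (r :: rest) rs hne

-- the whole valid branch: A's table equals B's table on a rectangular matrix of width n+1
theorem valid_case (r0 : List Int) (rest : List (List Int)) (n : Nat)
    (hrows : ∀ row ∈ r0 :: rest, row.length = n + 1) :
    matrix_to_strings (r0 :: rest) = matrix_to_strings_alt (r0 :: rest) := by
  have hv : pvValidate (r0 :: rest) = true := by
    simp only [pvValidate, List.all_eq_true]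
    intro row hr
    rw [hrows row (by simp [hr]), hrows r0 (by simp)]
    exact beq_self_eq_true _
  have hvB : (rest.any fun row => decide (row.length ≠ r0.length)) = false := by
    simp only [List.any_eq_false, decide_eq_true_eq, not_not]
    intro row hr
    rw [hrows row (by simp [hr]), hrows r0 (by simp)]
  have hmatne : (r0 :: rest) ≠ [] := by simp
  have hne : ∀ row ∈ r0 :: rest, row ≠ [] := by
    intro row hr hnil
    have := hrows row hr
    simp [hnil] at this
  have hZ := zipStar_head n (r0 :: rest) hmatne hrows
  have htrans : pvTranspose (r0 :: rest) = pvZipStarGo (n + 1) (r0 :: rest) := by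
    have : (r0 :: rest).headI.length = n + 1 := hrows r0 (by simp)
    rw [pvTranspose, this]
  have hlenT : (pvZipStarGo (n + 1) (r0 :: rest)).length = n + 1 :=
    length_zipStar (n + 1) _ hmatne hrows
  -- the leftmost column of the transpose is the list of row heads
  have hc0 : pvMaxNat ((pvZipStarGo (n + 1) (r0 :: rest)).headI.map (fun v => (pvStr v).length))
      = pvMaxNat ((r0 :: rest).map (fun row => (pvStr row.headI).length)) := by
    rw [hZ]
    simp [List.map_map, Function.comp_def]
  -- A's column-major global maximum is B's row-major one (same multiset of entries)
  have hg : pvMaxNat ((pvZipStarGo (n + 1) (r0 :: rest)).map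
        (fun col => pvMaxNat (col.map (fun v => (pvStr v).length))))
      = pvMaxNat (((r0 :: rest).map (fun row => row.map (fun v => (pvStr v).length))).flatten) := by
    simp only [pvMaxNat_eq_foldl]
    have h1 : ((pvZipStarGo (n + 1) (r0 :: rest)).map
        (fun col => (col.map (fun v => (pvStr v).length)).foldl max 0))
        = ((pvZipStarGo (n + 1) (r0 :: rest)).map (List.map (fun v => (pvStr v).length))).map
            (fun l => l.foldl max 0) := by
      rw [List.map_map]
      simp [Function.comp_def]
    rw [h1, foldl_max_flatten, ← List.map_flatten, ← List.map_flatten]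
    exact ((flatten_zipStar_perm (n + 1) (r0 :: rest) hrows).map
      (fun v => (pvStr v).length)).foldl_eq 0
  -- the column-widths list, written as head :: tail
  have hcw : ∀ (c0 g1 : Nat), (List.replicate (n + 1) g1).set 0 c0 = c0 :: List.replicate n g1 := by
    intro c0 g1
    rw [List.replicate_succ]
    rfl
  -- A's fold over the columns builds B's row strings
  have hfold : ∀ (c0 g1 : Nat),
      ((pvZipStarGo (n + 1) (r0 :: rest)).zip (c0 :: List.replicate n g1)).foldl
        (fun rs cc => List.zipWith (fun s v => s ++ pvCell v cc.2) rs cc.1)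
        ((r0 :: rest).map fun _ => ([] : List Char))
      = (r0 :: rest).map (fun row =>
          pvCell row.headI c0 ++ (row.tail.map (fun v => pvCell v g1)).flatten) := by
    intro c0 g1
    have hws : (c0 :: List.replicate n g1).length = n + 1 := by simp
    have := fold_cols (c0 :: List.replicate n g1) (r0 :: rest)
      ((r0 :: rest).map fun _ => ([] : List Char)) (by simp)
      (by intro row hr; rw [hrows row hr, hws])
    rw [hws] at this
    rw [this, zipWith_map_self]
    refine List.map_congr_left ?_
    intro row hr
    obtain ⟨hd, tl, rfl⟩ : ∃ hd tl, row = hd :: tl := by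
      cases row with
      | nil => exact absurd rfl (hne _ hr)
      | cons a b => exact ⟨a, b, rfl⟩
    have htl : tl.length = n := by
      have := hrows _ hr
      simpa using this
    simp only [List.zipWith_cons_cons, List.flatten_cons, List.nil_append, List.tail_cons,
      List.headI]
    rw [← htl, zipWith_const_replicate]
  rw [matrix_to_strings, matrix_to_strings_alt]
  rw [if_neg (by simp [hv]), if_neg (by simp_all)]
  simp only [htrans, hlenT, hc0, hg, hcw, hfold]
  rw [PySem.List.foldl_append_singleton_eq_map]
  simp

theorem matrix_to_strings_spec : Claim_equal_matrix_to_strings := by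
  intro mat _hdom hpre
  unfold Spec_matrix_to_strings
  obtain ⟨hne, hwidth⟩ := hpre
  cases mat with
  | nil => exact absurd rfl hne
  | cons r0 rest =>
    by_cases hv : pvValidate (r0 :: rest) = true
    · -- valid matrix: the real table
      have hrows : ∀ row ∈ r0 :: rest, row.length = r0.length := by
        intro row hr
        rcases List.mem_cons.mp hr with rfl | hr'
        · rfl
        · exact (by simpa [pvValidate] using hv : ∀ x ∈ rest, x.length = r0.length) row hr'
      have hn : r0.length ≠ 0 := hwidth (by simpa using hrows)
      obtain ⟨n, hn'⟩ : ∃ n, r0.length = n + 1 :=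
        ⟨r0.length - 1, (Nat.succ_pred_eq_of_ne_zero hn).symm⟩
      exact valid_case r0 rest n (fun row hr => hn' ▸ hrows row hr)
    · -- ragged matrix: both return the repr message
      have hv' : rest.any (fun row => row.length ≠ r0.length) = true := by
        simpa [pvValidate, List.all_eq_true, List.any_eq_true] using hv
      rw [matrix_to_strings, if_pos (by simpa using hv), matrix_to_strings_alt]
      rw [if_pos hv']
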